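-- pv_equiv track=rewrite | github.com/Briankang3/CMPUT-355 | a4.py | down_connect
-- ===== SOURCE A (Python) =====
-- def down_connect(board,a,x,y):
--     if x<0 or x>10 or board[x][y]!=a:
--         return False
--     else:
--         if y==10:
--             return True
--         else:
--             return down_connect(board,a,x-1,y+1) or down_connect(board,a,x,y+1) or down_connect(board,a,x+1,y+1)
-- ===== SOURCE B (Python) =====
-- def down_connect(board, a, x, y):
--     if x < 0 or x > 10 or board[x][y] != a:
--         return False
--     # bottom-up DP over columns: reach[r] == chain of a-cells from (r, c) reaches column 10
--     reach = [board[r][10] == a for r in range(11)]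
--     for k in range(10 - y):
--         c = 9 - k
--         reach = [board[r][c] == a and any(reach[max(r - 1, 0):r + 2]) for r in range(11)]
--     return reach[x]
-- ===== Notes on version B (the rewrite author's own statement) =====
-- stated objective: alternative
-- what changed: Replaces A's exponential three-way branching recursion over (x,y) with a bottom-up DP that sweeps columns from 10 down to y maintaining an 11-entry reachability vector, examining each cell once (the measured timing on generated boards showed no speed difference, so no speed is claimed).
-- outside the precondition, e.g. on down_connect([[5, 5, 5, 5, 5, 5, 5, 5, 5, 5, 5]], 5, 0, 0): A returns True, B raises IndexError
import Mathlib
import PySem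

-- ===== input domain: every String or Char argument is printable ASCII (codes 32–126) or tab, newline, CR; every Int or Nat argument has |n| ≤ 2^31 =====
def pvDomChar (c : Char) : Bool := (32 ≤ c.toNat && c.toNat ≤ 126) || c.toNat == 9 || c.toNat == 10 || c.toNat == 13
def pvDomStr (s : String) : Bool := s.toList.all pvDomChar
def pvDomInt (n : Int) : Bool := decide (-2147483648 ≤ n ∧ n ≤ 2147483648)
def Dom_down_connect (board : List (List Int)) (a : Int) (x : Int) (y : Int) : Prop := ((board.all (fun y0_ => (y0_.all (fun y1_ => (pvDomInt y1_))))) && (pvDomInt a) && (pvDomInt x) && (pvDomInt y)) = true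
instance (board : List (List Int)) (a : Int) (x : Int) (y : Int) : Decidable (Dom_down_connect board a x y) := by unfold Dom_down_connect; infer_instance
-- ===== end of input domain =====

-- B replaces A's three-way branching recursion by a bottom-up column DP keeping an
-- 11-entry reachability vector (objective: alternative algorithm, same measured cost).


-- ===== PORT A =====
-- board[r][c] with Python index semantics (none = IndexError)
def pvGet2 (board : List (List Int)) (r c : Int) : Option Int :=
  (PySem.List.pyGet? board r).bind (fun row => PySem.List.pyGet? row c)

-- literal transliteration of A; fuel only makes the recursion total (Pre_ guarantees it suffices)
def dcAux (board : List (List Int)) (a : Int) : Nat → Int → Int → Bool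
  | 0, _, _ => false
  | Nat.succ fuel, x, y =>
    if x < 0 || 10 < x then false
    else
      match pvGet2 board x y with
      | none => false        -- Python raises IndexError here; excluded by Pre_
      | some v =>
        if v != a then false
        else if y == 10 then true
        else dcAux board a fuel (x - 1) (y + 1) || dcAux board a fuel x (y + 1) ||
             dcAux board a fuel (x + 1) (y + 1)

def down_connect (board : List (List Int)) (a : Int) (x : Int) (y : Int) : Bool :=
  dcAux board a (11 - y).toNat x y

-- ===== PORT B =====
def altCell (board : List (List Int)) (a : Int) (r c : Int) : Bool :=
  pvGet2 board r c == some a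

-- one column step of Source B's comprehension: board[r][c] == a and any(reach[max(r-1,0):r+2])
def altStep (board : List (List Int)) (a : Int) (c : Int) (reach : List Bool) : List Bool :=
  (PySem.List.pyRange 0 11 1).map (fun r =>
    altCell board a r c && (PySem.List.slice reach (some (max (r - 1) 0)) (some (r + 2))).any id)

def down_connect_alt (board : List (List Int)) (a : Int) (x : Int) (y : Int) : Bool :=
  if x < 0 || 10 < x then false
  else
    match pvGet2 board x y with
    | none => false          -- Python raises IndexError here; excluded by Pre_
    | some v =>
      if v != a then false
      else
        let reach0 := (PySem.List.pyRange 0 11 1).map (fun r => altCell board a r 10)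
        let reach := (PySem.List.pyRange 0 (10 - y) 1).foldl
          (fun acc k => altStep board a (9 - k) acc) reach0
        (PySem.List.pyGet? reach x).getD false   -- reach[x]; x ∈ [0,10] so never none

-- ===== PRECONDITION & SPEC =====
-- Pre_ admits any x outside [0,10], any input whose start cell board[x][y] exists and differs
-- from a (both programs answer False at once), and full 11x11 grids with -11 ≤ y ≤ 10.  It
-- excludes (for 0 ≤ x ≤ 10, start cell equal to a) boards without a full 11x11 grid and start
-- columns outside [-11,10]: there A either hits an IndexError or returns only thanks to
-- short-circuiting, while B's column DP touches cells A skips and raises.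
def Pre_down_connect (board : List (List Int)) (a : Int) (x : Int) (y : Int) : Prop :=
  x < 0 ∨ 10 < x ∨
    (pvGet2 board x y ≠ none ∧ pvGet2 board x y ≠ some a) ∨
    (11 ≤ board.length ∧ (∀ row ∈ board.take 11, 11 ≤ row.length) ∧ -11 ≤ y ∧ y ≤ 10)
instance (board : List (List Int)) (a : Int) (x : Int) (y : Int) : Decidable (Pre_down_connect board a x y) := by unfold Pre_down_connect; infer_instance

def pvWitness_down_connect : List (List Int) × Int × Int × Int :=
  ([[1,0,0,0,0,0,0,0,0,0,0],
    [0,1,1,1,1,1,1,1,1,1,1],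
    [0,0,0,0,0,0,0,0,0,0,0],
    [0,0,0,0,0,0,0,0,0,0,0],
    [0,0,0,0,0,0,0,0,0,0,0],
    [0,0,0,0,0,0,0,0,0,0,0],
    [0,0,0,0,0,0,0,0,0,0,0],
    [0,0,0,0,0,0,0,0,0,0,0],
    [0,0,0,0,0,0,0,0,0,0,0],
    [0,0,0,0,0,0,0,0,0,0,0],
    [0,0,0,0,0,0,0,0,0,0,0]], 1, 0, 0)

def Spec_down_connect (board : List (List Int)) (a : Int) (x : Int) (y : Int) (out : Bool) : Prop := out = down_connect_alt board a x y
instance (board : List (List Int)) (a : Int) (x : Int) (y : Int) (out : Bool) : Decidable (Spec_down_connect board a x y out) := by unfold Spec_down_connect; infer_instance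

-- ===== CLAIM (what is proved, stated in full; the proofs are below) =====
def Claim_equal_down_connect : Prop := ∀ (board : List (List Int)) (a : Int) (x : Int) (y : Int), Dom_down_connect board a x y → Pre_down_connect board a x y → Spec_down_connect board a x y (down_connect board a x y)

-- ===== LEMMAS AND PROOFS =====

-- reference function: pvG n r ↔ an a-chain starting at row r, column 10 - n reaches column 10
def pvG (board : List (List Int)) (a : Int) : Nat → Int → Bool
  | 0, r => decide (0 ≤ r ∧ r ≤ 10) && altCell board a r 10
  | Nat.succ n, r => decide (0 ≤ r ∧ r ≤ 10) && altCell board a r (9 - (n : Int)) &&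
      (pvG board a n (r - 1) || pvG board a n r || pvG board a n (r + 1))

lemma pvG_out (board : List (List Int)) (a : Int) (n : Nat) (r : Int)
    (h : ¬(0 ≤ r ∧ r ≤ 10)) : pvG board a n r = false := by
  cases n <;> simp [pvG, h]

lemma pvG_cell_false (board : List (List Int)) (a : Int) (n : Nat) (r : Int)
    (h : altCell board a r (10 - (n : Int)) = false) : pvG board a n r = false := by
  cases n with
  | zero => simp [pvG]; intro _ _; simpa using h
  | succ m =>
    have hc : (10 : Int) - ((m + 1 : Nat) : Int) = 9 - (m : Int) := by push_cast; ring
    rw [hc] at h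
    simp [pvG, h]

-- A-side: dcAux with enough fuel computes pvG
lemma dcAux_guard (board : List (List Int)) (a : Int) (f : Nat) (r y : Int)
    (h : r < 0 ∨ 10 < r) : dcAux board a (f + 1) r y = false := by
  have hg : (decide (r < 0) || decide (10 < r)) = true := by
    rcases h with h | h <;> simp [h]
  simp [dcAux, hg]

lemma dcAux_eq_pvG (board : List (List Int)) (a : Int) (n : Nat) :
    ∀ (fuel : Nat), n < fuel → ∀ (r : Int),
      dcAux board a fuel r (10 - (n : Int)) = pvG board a n r := by
  induction n with
  | zero =>
    intro fuel hf r
    obtain ⟨f, rfl⟩ : ∃ f, fuel = f + 1 := ⟨fuel - 1, by omega⟩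
    rw [show ((10 : Int) - ((0 : Nat) : Int)) = 10 by norm_num]
    by_cases hr : r < 0 ∨ 10 < r
    · rw [dcAux_guard _ _ _ _ _ hr, pvG_out _ _ _ _ (by omega)]
    · have hg : (decide (r < 0) || decide (10 < r)) = false := by
        simp only [Bool.or_eq_false_iff, decide_eq_false_iff_not]; omega
      have hin : (0 : Int) ≤ r ∧ r ≤ 10 := by omega
      cases hv : pvGet2 board r 10 with
      | none => simp [dcAux, hg, hv, pvG, altCell]
      | some v =>
        by_cases hva : v = a
        · subst hva; simp [dcAux, hg, hv, pvG, altCell, hin]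
        · simp [dcAux, hg, hv, pvG, altCell, hin, hva]
  | succ n ih =>
    intro fuel hf r
    obtain ⟨f, rfl⟩ : ∃ f, fuel = f + 1 := ⟨fuel - 1, by omega⟩
    have hfn : n < f := by omega
    rw [show ((10 : Int) - ((n + 1 : Nat) : Int)) = 9 - (n : Int) by push_cast; ring]
    by_cases hr : r < 0 ∨ 10 < r
    · rw [dcAux_guard _ _ _ _ _ hr, pvG_out _ _ _ _ (by omega)]
    · have hg : (decide (r < 0) || decide (10 < r)) = false := by
        simp only [Bool.or_eq_false_iff, decide_eq_false_iff_not]; omega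
      have hin : (0 : Int) ≤ r ∧ r ≤ 10 := by omega
      have h910 : ¬((9 : Int) - (n : Int) = 10) := by omega
      have hnext : (9 : Int) - (n : Int) + 1 = 10 - (n : Int) := by ring
      have hcol : (9 : Int) - (n : Int) = 10 - ((n + 1 : Nat) : Int) := by push_cast; ring
      cases hv : pvGet2 board r (9 - (n : Int)) with
      | none =>
        have hc : altCell board a r (10 - ((n + 1 : Nat) : Int)) = false := by
          rw [← hcol]; simp [altCell, hv]
        simp [dcAux, hg, hv, pvG_cell_false board a (n + 1) r hc]
      | some v =>
        by_cases hva : v = a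
        · subst hva
          simp only [dcAux, hg, Bool.false_eq_true, if_false, hv, bne_self_eq_false]
          rw [if_neg (by simpa using h910)]
          rw [hnext, ih f hfn (r - 1), ih f hfn r, ih f hfn (r + 1)]
          simp [pvG, altCell, hv, hin]
        · have hc : altCell board a r (10 - ((n + 1 : Nat) : Int)) = false := by
            rw [← hcol]; simp [altCell, hv, hva]
          simp [dcAux, hg, hv, hva, pvG_cell_false board a (n + 1) r hc]

-- the 11-element literal row range
lemma pyRange11 : PySem.List.pyRange 0 11 1 = [0,1,2,3,4,5,6,7,8,9,10] := by decide

-- B-side step: one comprehension turns the level-n vector into the level-(n+1) vector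
lemma altStep_map (board : List (List Int)) (a : Int) (n : Nat) :
    altStep board a (9 - (n : Int)) ((PySem.List.pyRange 0 11 1).map (pvG board a n)) =
      (PySem.List.pyRange 0 11 1).map (pvG board a (n + 1)) := by
  have h1 : pvG board a n (-1) = false := pvG_out _ _ _ _ (by omega)
  have h2 : pvG board a n 11 = false := pvG_out _ _ _ _ (by omega)
  rw [pyRange11]
  simp only [altStep, pyRange11, List.map_cons, List.map_nil]
  norm_num [PySem.List.slice_toNat, List.any, pvG, h1, h2, Bool.or_assoc, Bool.and_assoc,
    show Int.toNat 0 = 0 from rfl, show Int.toNat 1 = 1 from rfl, show Int.toNat 2 = 2 from rfl,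
    show Int.toNat 3 = 3 from rfl, show Int.toNat 4 = 4 from rfl, show Int.toNat 5 = 5 from rfl,
    show Int.toNat 6 = 6 from rfl, show Int.toNat 7 = 7 from rfl, show Int.toNat 8 = 8 from rfl,
    show Int.toNat 9 = 9 from rfl, show Int.toNat 10 = 10 from rfl, show Int.toNat 11 = 11 from rfl,
    show Int.toNat 12 = 12 from rfl]

-- B-side: the fold over all processed columns produces the level-m vector
lemma fold_eq_map (board : List (List Int)) (a : Int) (m : Nat) :
    (PySem.List.pyRange 0 (m : Int) 1).foldl
        (fun acc k => altStep board a (9 - k) acc)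
        ((PySem.List.pyRange 0 11 1).map (fun r => altCell board a r 10)) =
      (PySem.List.pyRange 0 11 1).map (pvG board a m) := by
  induction m with
  | zero =>
    have : PySem.List.pyRange 0 ((0 : Nat) : Int) 1 = [] := by decide
    rw [this]
    simp only [List.foldl_nil]
    rw [pyRange11]
    simp [pvG]
  | succ m ih =>
    have hsplit : PySem.List.pyRange 0 ((m + 1 : Nat) : Int) 1 =
        PySem.List.pyRange 0 (m : Int) 1 ++ [(m : Int)] := by
      rw [PySem.List.pyRange_one, PySem.List.pyRange_one]
      have h1 : (((m : Int) + 1) - 0).toNat = m + 1 := by omega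
      have h2 : ((m : Int) - 0).toNat = m := by omega
      push_cast
      rw [h1, h2, List.range_succ]
      simp
    rw [hsplit, List.foldl_append, ih]
    simp only [List.foldl_cons, List.foldl_nil]
    exact altStep_map board a m

lemma pyGet_map_range11 (f : Int → Bool) (x : Int) (h0 : 0 ≤ x) (h10 : x ≤ 10) :
    (PySem.List.pyGet? ((PySem.List.pyRange 0 11 1).map f) x).getD false = f x := by
  rw [pyRange11]
  interval_cases x <;> simp [PySem.List.pyGet?, PySem.List.pyIdx?]

-- main equivalence on y ≤ 10 (the board shape plays no role for the ports themselves)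
lemma main_eq (board : List (List Int)) (a : Int) (x y : Int) (hy : y ≤ 10) :
    down_connect board a x y = down_connect_alt board a x y := by
  set n : Nat := (10 - y).toNat with hn
  have hyn : y = 10 - (n : Int) := by omega
  have hfuel : (11 - y).toNat = n + 1 := by omega
  have hA : down_connect board a x y = pvG board a n x := by
    rw [down_connect, hfuel, hyn]
    exact dcAux_eq_pvG board a n (n + 1) (by omega) x
  rw [hA, down_connect_alt]
  by_cases hr : x < 0 ∨ 10 < x
  · have hg : (decide (x < 0) || decide (10 < x)) = true := by
      rcases hr with h | h <;> simp [h]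
    rw [hg]
    simp [pvG_out board a n x (by omega)]
  · have hg : (decide (x < 0) || decide (10 < x)) = false := by
      simp only [Bool.or_eq_false_iff, decide_eq_false_iff_not]; omega
    rw [hg]
    simp only [Bool.false_eq_true, if_false]
    cases hv : pvGet2 board x y with
    | none =>
      rw [pvG_cell_false board a n x (by rw [← hyn]; simp [altCell, hv])]
    | some v =>
      by_cases hva : v = a
      · have hb0 : (v != a) = false := by simp [hva]
        simp only [hb0, Bool.false_eq_true, if_false]
        have h10y : (10 : Int) - y = (n : Int) := by omega
        rw [h10y, fold_eq_map board a n]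
        exact (pyGet_map_range11 (pvG board a n) x (by omega) (by omega)).symm
      · have hb : (v != a) = true := by simp [hva]
        simp only [hb, if_true]
        rw [pvG_cell_false board a n x (by rw [← hyn]; simp [altCell, hv, hva])]

-- both ports answer False when the start cell exists and differs from a
lemma guard_true_eq (board : List (List Int)) (a : Int) (x y : Int)
    (hr : x < 0 ∨ 10 < x) : down_connect board a x y = down_connect_alt board a x y := by
  have hg : (decide (x < 0) || decide (10 < x)) = true := by
    rcases hr with h | h <;> simp [h]
  rw [down_connect, down_connect_alt, if_pos hg]
  cases hfe : (11 - y).toNat with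
  | zero => simp [dcAux]
  | succ f => simp [dcAux, hg]

lemma cell_ne_eq (board : List (List Int)) (a : Int) (x y : Int)
    (hnn : pvGet2 board x y ≠ none) (hna : pvGet2 board x y ≠ some a) :
    down_connect board a x y = down_connect_alt board a x y := by
  by_cases hr : x < 0 ∨ 10 < x
  · exact guard_true_eq board a x y hr
  · cases hv : pvGet2 board x y with
    | none => exact absurd hv hnn
    | some v =>
      have hva : v ≠ a := by rintro rfl; exact hna hv
      have hb : (v != a) = true := by simp [hva]
      have hg : (decide (x < 0) || decide (10 < x)) = false := by
        simp only [Bool.or_eq_false_iff, decide_eq_false_iff_not]; omega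
      rw [down_connect, down_connect_alt, hg]
      simp only [Bool.false_eq_true, if_false, hv, hb, if_true]
      cases hfe : (11 - y).toNat with
      | zero => simp [dcAux]
      | succ f => simp [dcAux, hg, hv, hb]

-- ===== VERDICT (by name: the statement is the Claim_ definition above) =====
theorem down_connect_spec : Claim_equal_down_connect := by
  intro board a x y _hdom hpre
  unfold Spec_down_connect
  rcases hpre with hx | hx | ⟨hnn, hna⟩ | ⟨_, _, _, hy⟩
  · exact guard_true_eq board a x y (Or.inl hx)
  · exact guard_true_eq board a x y (Or.inr hx)
  · exact cell_ne_eq board a x y hnn hna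
  · exact main_eq board a x y hy
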